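-- pv_equiv track=rewrite | github.com/FiooCode/cakechat | cakechat/api/v1/model.py | convert_ids_to_sentence
-- ===== SOURCE A (Python) =====
-- def convert_ids_to_sentence(ids, w_list):
--     """
--     convert list of ids to a list of words (a sentence)
--     :param ids: list- ids to convert.
--     :param w_list: list- word list or vocabulary. (for converting)
--     :return: list- converted words.
--     """
--     EOS_token_index = w_list.index('<EOS>')
--     pad_token_index = w_list.index('<pad>')
--     my_str = ""
--     list_of_responses = []
--     for num in ids:
--         if num[0] == EOS_token_index or num[0] == pad_token_index:
--             list_of_responses.append(my_str)
--             my_str = ""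
--         else:
--             my_str = my_str + w_list[num[0]] + " "
--     if my_str:
--         list_of_responses.append(my_str)
--     list_of_responses = [i for i in list_of_responses if i]
--     return list_of_responses
-- ===== SOURCE B (Python) =====
-- def convert_ids_to_sentence(ids, w_list):
--     """Two-phase rewrite: first split ids into groups at EOS/pad delimiters,
--     then render each non-empty group with a join."""
--     EOS_token_index = w_list.index('<EOS>')
--     pad_token_index = w_list.index('<pad>')
--     groups = []
--     cur = []
--     for num in ids:
--         if num[0] == EOS_token_index or num[0] == pad_token_index:
--             groups.append(cur)
--             cur = []
--         else:
--             cur.append(num)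
--     groups.append(cur)
--     return [' '.join(w_list[n[0]] for n in g) + ' ' for g in groups if g]
-- ===== Notes on version B (the rewrite author's own statement) =====
-- stated objective: alternative
-- what changed: B splits the ids into delimiter-separated groups first and then renders each non-empty group with a single ' '.join, instead of accumulating a running string that is flushed and reset inline.
import Mathlib
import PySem

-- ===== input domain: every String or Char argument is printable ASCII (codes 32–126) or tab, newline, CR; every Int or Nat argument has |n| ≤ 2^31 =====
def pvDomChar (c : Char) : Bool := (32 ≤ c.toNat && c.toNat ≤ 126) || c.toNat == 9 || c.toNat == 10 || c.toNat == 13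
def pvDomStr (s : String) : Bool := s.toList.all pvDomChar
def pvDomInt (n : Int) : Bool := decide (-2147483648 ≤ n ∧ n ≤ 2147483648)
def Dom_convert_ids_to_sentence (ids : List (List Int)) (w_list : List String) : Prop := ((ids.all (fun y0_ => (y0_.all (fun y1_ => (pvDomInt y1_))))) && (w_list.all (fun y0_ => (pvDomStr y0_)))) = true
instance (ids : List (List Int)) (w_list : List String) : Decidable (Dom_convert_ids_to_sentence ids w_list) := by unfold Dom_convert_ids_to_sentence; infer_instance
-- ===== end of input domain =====

-- B changes the decomposition (split into groups, then join each group); same cost, no speed claim.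

-- ===== PORT A =====
-- strings are handled as List Char (PySem.Chars representation); String.mk only at the end
def convert_ids_to_sentence (ids : List (List Int)) (w_list : List String) : List String :=
  match PySem.List.index? w_list "<EOS>", PySem.List.index? w_list "<pad>" with
  | some EOS_token_index, some pad_token_index =>
      let st := ids.foldl (fun (acc : List Char × List (List Char)) num =>
        match PySem.List.pyGet? num 0 with
        | none => acc            -- Python raises IndexError here; excluded by Pre_
        | some n0 =>
          if n0 == (EOS_token_index : Int) || n0 == (pad_token_index : Int) then
            ([], acc.2 ++ [acc.1])
          else
            match PySem.List.pyGet? w_list n0 with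
            | some w => (acc.1 ++ w.toList ++ [' '], acc.2)
            | none => acc        -- Python raises IndexError here; excluded by Pre_
        ) ([], [])
      let lst := if st.1 ≠ [] then st.2 ++ [st.1] else st.2
      (lst.filter (· ≠ [])).map String.mk
  | _, _ => []                   -- Python raises ValueError here; excluded by Pre_

-- ===== PORT B =====
def convert_ids_to_sentence_alt (ids : List (List Int)) (w_list : List String) : List String :=
  -- Option.elim: the none branches are Python's ValueError / IndexError, excluded by Pre_
  (PySem.List.index? w_list "<EOS>").elim [] (fun EOS_token_index =>
    (PySem.List.index? w_list "<pad>").elim [] (fun pad_token_index =>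
      let st := ids.foldl (fun (acc : List (List (List Int)) × List (List Int)) num =>
        (PySem.List.pyGet? num 0).elim acc (fun n0 =>
          if n0 == (EOS_token_index : Int) || n0 == (pad_token_index : Int) then
            (acc.1 ++ [acc.2], [])
          else
            (acc.1, acc.2 ++ [num]))) ([], [])
      let groups := st.1 ++ [st.2]
      (groups.filter (· ≠ [])).map (fun g =>
        String.mk (PySem.Chars.join [' '] (g.map (fun n =>
          (((PySem.List.pyGet? n 0).bind (PySem.List.pyGet? w_list)).getD "").toList)) ++ [' ']))))

-- ===== PRECONDITION & SPEC =====
-- Pre_ excludes exactly the inputs where the Python raises: ValueError when '<EOS>' or '<pad>'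
-- is missing from w_list, IndexError when some num is empty or num[0] is out of range for w_list.
def Pre_convert_ids_to_sentence (ids : List (List Int)) (w_list : List String) : Prop :=
  "<EOS>" ∈ w_list ∧ "<pad>" ∈ w_list ∧
  ∀ num ∈ ids, num ≠ [] ∧ PySem.Raise.InRange w_list.length (num.headD 0)
instance (ids : List (List Int)) (w_list : List String) : Decidable (Pre_convert_ids_to_sentence ids w_list) := by unfold Pre_convert_ids_to_sentence; infer_instance

def pvWitness_convert_ids_to_sentence : List (List Int) × List String :=
  ([[2], [3], [0], [2], [1]], ["<EOS>", "<pad>", "hi", "there"])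

def Spec_convert_ids_to_sentence (ids : List (List Int)) (w_list : List String) (out : List String) : Prop := out = convert_ids_to_sentence_alt ids w_list
instance (ids : List (List Int)) (w_list : List String) (out : List String) : Decidable (Spec_convert_ids_to_sentence ids w_list out) := by unfold Spec_convert_ids_to_sentence; infer_instance

-- ===== CLAIM (what is proved, stated in full; the proofs are below) =====
def Claim_equal_convert_ids_to_sentence : Prop := ∀ (ids : List (List Int)) (w_list : List String), Dom_convert_ids_to_sentence ids w_list → Pre_convert_ids_to_sentence ids w_list → Spec_convert_ids_to_sentence ids w_list (convert_ids_to_sentence ids w_list)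

-- ===== LEMMAS AND PROOFS =====


-- word rendered for one id row (both ports' lookups composed; total under Pre_)
def pvWordOf (w_list : List String) (n : List Int) : List Char :=
  (((PySem.List.pyGet? n 0).bind (PySem.List.pyGet? w_list)).getD "").toList

-- A's running string for a processed group
def pvRend (w_list : List String) (g : List (List Int)) : List Char :=
  (g.map (fun n => pvWordOf w_list n ++ [' '])).flatten

theorem pvRend_append (w_list : List String) (g : List (List Int)) (n : List Int) :
    pvRend w_list (g ++ [n]) = pvRend w_list g ++ (pvWordOf w_list n ++ [' ']) := by
  simp [pvRend]

theorem pvRend_ne_nil (w_list : List String) (n : List Int) (g : List (List Int)) :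
    pvRend w_list (n :: g) ≠ [] := by
  simp [pvRend]

theorem pvJoin_eq_rend (w_list : List String) (g : List (List Int)) (hg : g ≠ []) :
    PySem.Chars.join [' '] (g.map (pvWordOf w_list)) ++ [' '] = pvRend w_list g := by
  induction g with
  | nil => exact absurd rfl hg
  | cons n g ih =>
    cases g with
    | nil => simp [PySem.Chars.join_singleton, pvRend]
    | cons m g' =>
      simp only [List.map_cons, PySem.Chars.join_cons_cons]
      have := ih (by simp)
      simp only [List.map_cons] at this
      calc (pvWordOf w_list n ++ [' '] ++
              PySem.Chars.join [' '] (pvWordOf w_list m :: g'.map (pvWordOf w_list))) ++ [' ']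
          = (pvWordOf w_list n ++ [' ']) ++
              (PySem.Chars.join [' '] (pvWordOf w_list m :: g'.map (pvWordOf w_list)) ++ [' ']) := by
            simp
        _ = (pvWordOf w_list n ++ [' ']) ++ pvRend w_list (m :: g') := by rw [this]
        _ = pvRend w_list (n :: m :: g') := by simp [pvRend]

-- the two folds stay related: A's string = render of B's current group, A's list = renders of B's groups
theorem pvFold_rel (w_list : List String) (eos pad : Nat) (ids : List (List Int))
    (cur : List (List Int)) (gs : List (List (List Int)))
    (h : ∀ num ∈ ids, num ≠ [] ∧ PySem.Raise.InRange w_list.length (num.headD 0)) :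
    ids.foldl (fun (acc : List Char × List (List Char)) num =>
        match PySem.List.pyGet? num 0 with
        | none => acc
        | some n0 =>
          if n0 == (eos : Int) || n0 == (pad : Int) then
            ([], acc.2 ++ [acc.1])
          else
            match PySem.List.pyGet? w_list n0 with
            | some w => (acc.1 ++ w.toList ++ [' '], acc.2)
            | none => acc) (pvRend w_list cur, gs.map (pvRend w_list))
    = (fun (p : List (List (List Int)) × List (List Int)) =>
        (pvRend w_list p.2, p.1.map (pvRend w_list)))
      (ids.foldl (fun (acc : List (List (List Int)) × List (List Int)) num =>
        (PySem.List.pyGet? num 0).elim acc (fun n0 =>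
          if n0 == (eos : Int) || n0 == (pad : Int) then
            (acc.1 ++ [acc.2], [])
          else
            (acc.1, acc.2 ++ [num]))) (gs, cur)) := by
  induction ids generalizing cur gs with
  | nil => simp
  | cons num rest ih =>
    obtain ⟨hne, hrange⟩ := h num (by simp)
    obtain ⟨h0, tl, rfl⟩ := List.exists_cons_of_ne_nil hne
    simp only [List.foldl_cons, PySem.List.pyGet?_zero_cons]
    have hrest : ∀ num ∈ rest, num ≠ [] ∧ PySem.Raise.InRange w_list.length (num.headD 0) :=
      fun m hm => h m (by simp [hm])
    by_cases hd : (h0 == (eos : Int) || h0 == (pad : Int)) = true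
    · have hd' : h0 = (eos : Int) ∨ h0 = (pad : Int) := by simpa using hd
      simp only [hd]
      have := ih [] (gs ++ [cur]) hrest
      simpa [pvRend, hd'] using this
    · simp only [hd]
      have : PySem.List.pyGet? w_list h0 ≠ none := by
        rw [Ne, PySem.List.pyGet?_eq_none_iff]
        exact not_not_intro (by simpa using hrange)
      obtain ⟨w, hw⟩ := Option.ne_none_iff_exists'.mp this
      rw [hw]
      have hword : pvWordOf w_list (h0 :: tl) = w.toList := by
        simp [pvWordOf, hw]
      have := ih (cur ++ [h0 :: tl]) gs hrest
      rw [pvRend_append, hword] at this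
      have hd' : ¬ (h0 = (eos : Int) ∨ h0 = (pad : Int)) := by simpa using hd
      simpa [List.append_assoc, hd'] using this

-- ===== VERDICT (by name: the statement is the Claim_ definition above) =====
theorem convert_ids_to_sentence_spec : Claim_equal_convert_ids_to_sentence := by
  intro ids w_list _hdom hpre
  obtain ⟨heos, hpad, hnum⟩ := hpre
  unfold Spec_convert_ids_to_sentence convert_ids_to_sentence convert_ids_to_sentence_alt
  have heosn : PySem.List.index? w_list "<EOS>" ≠ none := by
    rw [Ne, PySem.List.index?_eq_none_iff]
    exact not_not_intro heos
  have hpadn : PySem.List.index? w_list "<pad>" ≠ none := by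
    rw [Ne, PySem.List.index?_eq_none_iff]
    exact not_not_intro hpad
  obtain ⟨eos, heosq⟩ := Option.ne_none_iff_exists'.mp heosn
  obtain ⟨pad, hpadq⟩ := Option.ne_none_iff_exists'.mp hpadn
  rw [heosq, hpadq]
  simp only [Option.elim_some]
  have hrel := pvFold_rel w_list eos pad ids [] [] hnum
  rw [show pvRend w_list [] = [] from rfl, show List.map (pvRend w_list) [] = [] from rfl] at hrel
  rw [hrel]
  dsimp only
  set stB := ids.foldl (fun (acc : List (List (List Int)) × List (List Int)) num =>
        (PySem.List.pyGet? num 0).elim acc (fun n0 =>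
          if n0 == (eos : Int) || n0 == (pad : Int) then
            (acc.1 ++ [acc.2], [])
          else
            (acc.1, acc.2 ++ [num]))) ([], []) with hstB
  have hflush :
      (if pvRend w_list stB.2 ≠ [] then stB.1.map (pvRend w_list) ++ [pvRend w_list stB.2]
       else stB.1.map (pvRend w_list)).filter (· ≠ [])
      = (((stB.1 ++ [stB.2]).map (pvRend w_list)).filter (· ≠ [])) := by
    by_cases hc : pvRend w_list stB.2 = []
    · simp [hc, List.filter_append]
    · simp [hc, List.filter_append]
  rw [hflush]
  rw [List.filter_map]
  have hfeq : List.filter ((fun s => decide (s ≠ [])) ∘ pvRend w_list) (stB.1 ++ [stB.2])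
      = List.filter (· ≠ []) (stB.1 ++ [stB.2]) := by
    apply List.filter_congr
    intro g _
    cases g with
    | nil => simp [pvRend]
    | cons n g' => simp [pvRend_ne_nil]
  rw [hfeq, List.map_map]
  apply List.map_congr_left
  intro g hg
  have hgne : g ≠ [] := by
    have := List.of_mem_filter hg
    simpa using this
  simp only [Function.comp]
  rw [← pvJoin_eq_rend w_list g hgne]
  rfl
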